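-- pv_equiv track=rewrite | github.com/saikoneru/NMT_Localization | scripts/utils.py | find_unique
-- ===== SOURCE A (Python) =====
-- def find_unique(src,tgt):
--     ids = []
--     unique_src = []
--     unique_tgt = []
--     dict_ids = {}
--
--     pair_tuples = list(zip(src,tgt))
--     for i in range(len(pair_tuples)):
--         dict_ids[pair_tuples[i]] = i
--
--     unique_tuples = list(dict.fromkeys(pair_tuples))
--
--     for unique in unique_tuples:
--         idx = dict_ids[unique]
--         ids.append(idx)
--         unique_src.append(src[idx])
--         unique_tgt.append(tgt[idx])
--     return ids, unique_src, unique_tgt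
-- ===== SOURCE B (Python) =====
-- def find_unique(src, tgt):
--     ids = []
--     unique_src = []
--     unique_tgt = []
--     pos = {}
--     for i, pair in enumerate(zip(src, tgt)):
--         if pair in pos:
--             ids[pos[pair]] = i
--         else:
--             pos[pair] = len(ids)
--             ids.append(i)
--             unique_src.append(pair[0])
--             unique_tgt.append(pair[1])
--     return ids, unique_src, unique_tgt
-- ===== Notes on version B (the rewrite author's own statement) =====
-- stated objective: simpler
-- what changed: Replaces A's staged offline construction (pair->last-index dict pass, dict.fromkeys dedup pass, then a third loop re-indexing src/tgt by the stored index) with one online streaming pass that emits each new pair's index and components immediately and, on a repeated pair, overwrites its already-emitted ids slot in place (the dict maps pair -> output slot, not pair -> input index).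
import Mathlib
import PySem

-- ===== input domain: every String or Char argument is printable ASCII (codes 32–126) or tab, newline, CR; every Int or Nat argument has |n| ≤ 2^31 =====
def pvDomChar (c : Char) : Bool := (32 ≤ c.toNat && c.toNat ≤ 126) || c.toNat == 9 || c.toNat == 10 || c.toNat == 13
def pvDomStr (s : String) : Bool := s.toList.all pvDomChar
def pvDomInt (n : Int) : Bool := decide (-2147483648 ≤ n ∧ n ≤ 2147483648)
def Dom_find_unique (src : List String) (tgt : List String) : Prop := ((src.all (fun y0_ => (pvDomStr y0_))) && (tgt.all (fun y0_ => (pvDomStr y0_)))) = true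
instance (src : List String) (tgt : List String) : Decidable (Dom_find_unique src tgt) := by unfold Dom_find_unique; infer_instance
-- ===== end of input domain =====

-- B replaces A's three staged passes with one online streaming pass that overwrites the
-- already-emitted ids slot of a repeated pair in place (different decomposition, same cost);
-- return value only, neither version mutates its arguments.

-- ===== PORT A =====
-- A: pair_tuples = zip; dict of pair -> index over range(len); dedup (dict.fromkeys) order;
-- final loop appends idx, src[idx], tgt[idx].  dict_ids[unique] always hits (key present) and
-- src[idx]/tgt[idx] are always in range, so the getD/pyGetD defaults are never taken.
def find_unique (src : List String) (tgt : List String) : List Int × List String × List String :=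
  let pair_tuples := src.zip tgt
  let dict_ids : PySem.Dict (String × String) Int :=
    (PySem.List.pyRange 0 pair_tuples.length 1).foldl
      (fun d i => d.insert (PySem.List.pyGetD pair_tuples i ("", "")) i) PySem.Dict.empty
  let unique_tuples := PySem.List.dedup pair_tuples
  let r := unique_tuples.foldl
    (fun (acc : List Int × List String × List String) u =>
      let idx := dict_ids.getD u 0
      (acc.1 ++ [idx], acc.2.1 ++ [PySem.List.pyGetD src idx ""],
       acc.2.2 ++ [PySem.List.pyGetD tgt idx ""]))
    ([], [], [])
  r

-- ===== PORT B =====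
-- B's loop body: 'if pair in pos: ids[pos[pair]] = i else: append i / pair[0] / pair[1]'.
-- pos stores a valid nonnegative index into ids whenever it hits, so Python's list assignment
-- ids[k] = i is exactly List.set k.toNat (never out of range, never negative).
def pvStepB (st : PySem.Dict (String × String) Int × List Int × List String × List String)
    (p : Int × (String × String)) :
    PySem.Dict (String × String) Int × List Int × List String × List String :=
  match st.1.get? p.2 with
  | some k => (st.1, st.2.1.set k.toNat p.1, st.2.2.1, st.2.2.2)
  | none => (st.1.insert p.2 (st.2.1.length : Int),
             st.2.1 ++ [p.1], st.2.2.1 ++ [p.2.1], st.2.2.2 ++ [p.2.2])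

-- the single pass 'for i, pair in enumerate(zip(src, tgt)): …'
def pvRunB (ps : List (String × String)) :
    PySem.Dict (String × String) Int × List Int × List String × List String :=
  (PySem.List.enumerate ps).foldl pvStepB (PySem.Dict.empty, [], [], [])

def find_unique_alt (src : List String) (tgt : List String) : List Int × List String × List String :=
  (pvRunB (src.zip tgt)).2

-- ===== PRECONDITION & SPEC =====
def Spec_find_unique (src : List String) (tgt : List String) (out : List Int × List String × List String) : Prop := out = find_unique_alt src tgt
instance (src : List String) (tgt : List String) (out : List Int × List String × List String) : Decidable (Spec_find_unique src tgt out) := by unfold Spec_find_unique; infer_instance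

-- ===== CLAIM (what is proved, stated in full; the proofs are below) =====
def Claim_equal_find_unique : Prop := ∀ (src : List String) (tgt : List String), Dom_find_unique src tgt → Spec_find_unique src tgt (find_unique src tgt)

-- ===== LEMMAS AND PROOFS =====

-- the pair -> last-index dict A builds, as a function of the zipped pair list
def pvDict (ps : List (String × String)) : PySem.Dict (String × String) Int :=
  (PySem.List.enumerate ps).foldl (fun d p => d.insert p.2 p.1) PySem.Dict.empty

theorem pvDict_append (ps : List (String × String)) (x : String × String) :
    pvDict (ps ++ [x]) = (pvDict ps).insert x (ps.length : Int) := by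
  simp [pvDict, PySem.List.enumerate_append, PySem.List.enumerate_cons, PySem.List.enumerate_nil]

-- A's index-loop dict equals the enumerate form pvDict
theorem pvDictA_eq (ps : List (String × String)) :
    (PySem.List.pyRange 0 ps.length 1).foldl
      (fun d i => d.insert (PySem.List.pyGetD ps i ("", "")) i) PySem.Dict.empty = pvDict ps := by
  induction ps using List.reverseRecOn with
  | nil => simp [pvDict, PySem.List.enumerate_nil]
  | append_singleton qs x ih =>
      have hsplit : PySem.List.pyRange 0 ((qs ++ [x]).length : Int) 1
          = PySem.List.pyRange 0 (qs.length : Int) 1 ++ [(qs.length : Int)] := by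
        have := PySem.List.pyRange_one_succ_right (a := 0) (b := (qs.length : Int)) (by positivity)
        simpa using this
      rw [hsplit, List.foldl_append]
      have hcong : (PySem.List.pyRange 0 (qs.length : Int) 1).foldl
          (fun d i => d.insert (PySem.List.pyGetD (qs ++ [x]) i ("", "")) i) PySem.Dict.empty
          = (PySem.List.pyRange 0 (qs.length : Int) 1).foldl
          (fun d i => d.insert (PySem.List.pyGetD qs i ("", "")) i) PySem.Dict.empty := by
        apply PySem.List.foldl_congr_mem
        intro d i hi
        have h := (PySem.List.mem_pyRange_one).1 hi
        have h1 : PySem.List.pyGetD (qs ++ [x]) i ("", "") = PySem.List.pyGetD qs i ("", "") := by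
          rw [PySem.List.pyGetD_eq_getElem (qs ++ [x]) ("", "") (by omega) (by simp; omega),
              PySem.List.pyGetD_eq_getElem qs ("", "") (by omega) (by omega)]
          rw [List.getElem_append_left (by omega)]
        rw [h1]
      rw [hcong, ih, pvDict_append]
      simp only [List.foldl_cons, List.foldl_nil]
      congr 1
      rw [PySem.List.pyGetD_eq_getElem (qs ++ [x]) ("", "") (by omega) (by simp)]
      simp

-- the stored index is a valid position of its key
theorem pvDict_spec (ps : List (String × String)) :
    ∀ u ∈ ps, 0 ≤ (pvDict ps).getD u 0 ∧ ((pvDict ps).getD u 0).toNat < ps.length ∧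
      ps[((pvDict ps).getD u 0).toNat]? = some u := by
  induction ps using List.reverseRecOn with
  | nil => intro u hu; simp at hu
  | append_singleton qs x ih =>
      intro u hu
      rw [pvDict_append]
      by_cases hx : u = x
      · subst hx
        rw [PySem.Dict.getD_insert_self]
        refine ⟨by positivity, by simp, ?_⟩
        simp
      · have hu' : u ∈ qs := by
          rcases List.mem_append.1 hu with h | h
          · exact h
          · simp at h; exact absurd h hx
        rw [PySem.Dict.getD_insert_of_ne _ _ _ hx]
        obtain ⟨h0, hlt, hget⟩ := ih u hu'
        refine ⟨h0, by simp; omega, ?_⟩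
        rw [List.getElem?_append_left hlt]
        exact hget

-- triple-accumulator foldl is three maps
theorem pvFoldl_triple {α β γ δ : Type} (l : List α) (f : α → β) (g : α → γ) (h : α → δ)
    (a : List β) (b : List γ) (c : List δ) :
    l.foldl (fun acc u => (acc.1 ++ [f u], acc.2.1 ++ [g u], acc.2.2 ++ [h u])) (a, b, c)
      = (a ++ l.map f, b ++ l.map g, c ++ l.map h) := by
  induction l generalizing a b c with
  | nil => simp
  | cons x l ih => simp [ih]

-- mapping g over a Nodup list differing from f only at l[k] is a set at k
theorem pvMap_set {α β : Type} (l : List α) (hnd : l.Nodup) (k : Nat) (hk : k < l.length)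
    (f g : α → β) (hfg : ∀ u ∈ l, u ≠ l[k] → g u = f u) :
    l.map g = (l.map f).set k (g l[k]) := by
  apply List.ext_getElem (by simp)
  intro i h1 h2
  simp only [List.length_map] at h1
  rw [List.getElem_map, List.getElem_set]
  by_cases hik : k = i
  · subst hik; rw [if_pos rfl]
  · rw [if_neg hik, List.getElem_map]
    exact hfg _ (List.getElem_mem h1) (fun he => hik ((List.Nodup.getElem_inj_iff hnd).mp he).symm)

-- invariant of B's single pass: pos maps each seen pair to its slot in the dedup order,
-- and the three output lists are exactly dedup + A's dict values / components
theorem pvRunB_spec (ps : List (String × String)) :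
    (∀ u, (pvRunB ps).1.get? u
        = if u ∈ ps then some (((PySem.List.dedup ps).idxOf u : Int)) else none)
    ∧ (pvRunB ps).2 = ((PySem.List.dedup ps).map (fun u => (pvDict ps).getD u 0),
        (PySem.List.dedup ps).map Prod.fst, (PySem.List.dedup ps).map Prod.snd) := by
  induction ps using List.reverseRecOn with
  | nil => exact ⟨fun u => by simp [pvRunB, PySem.List.enumerate_nil, PySem.Dict.get?_empty], by
      simp [pvRunB, PySem.List.enumerate_nil]⟩
  | append_singleton qs x ih =>
      obtain ⟨ih1, ih2⟩ := ih
      have hrun : pvRunB (qs ++ [x]) = pvStepB (pvRunB qs) ((qs.length : Int), x) := by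
        simp [pvRunB, PySem.List.enumerate_append, PySem.List.enumerate_cons,
          PySem.List.enumerate_nil, List.foldl_append]
      by_cases hx : x ∈ qs
      · -- repeated pair: dict unchanged, ids slot overwritten in place
        have hxd : x ∈ PySem.List.dedup qs := (PySem.List.mem_dedup qs x).2 hx
        have hxd' : x ∈ PySem.Set.ofList qs := by simpa using hxd
        have hded : PySem.List.dedup (qs ++ [x]) = PySem.List.dedup qs := by
          simp only [PySem.List.dedup_eq_ofList, PySem.Set.ofList_append_singleton]
          exact PySem.Set.add_of_mem hxd'
        have hstep : pvRunB (qs ++ [x]) =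
            ((pvRunB qs).1, (pvRunB qs).2.1.set ((PySem.List.dedup qs).idxOf x) (qs.length : Int),
             (pvRunB qs).2.2.1, (pvRunB qs).2.2.2) := by
          rw [hrun]; unfold pvStepB
          rw [ih1 x, if_pos hx]
          simp
        have hk : (PySem.List.dedup qs).idxOf x < (PySem.List.dedup qs).length :=
          List.idxOf_lt_length_of_mem hxd
        refine ⟨?_, ?_⟩
        · intro u
          rw [hstep]
          simp only []
          rw [ih1 u, hded]
          by_cases hu : u ∈ qs
          · rw [if_pos hu, if_pos (by simp [hu])]
          · have hnm : u ∉ qs ++ [x] := by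
              simp only [List.mem_append, List.mem_singleton]
              rintro (h | h)
              · exact hu h
              · exact hu (h ▸ hx)
            rw [if_neg hu, if_neg hnm]
        · rw [hstep]
          simp only []
          rw [hded]
          have h2 := ih2
          have hids : (pvRunB qs).2.1 = (PySem.List.dedup qs).map (fun u => (pvDict qs).getD u 0) := by
            rw [h2]
          have hus : (pvRunB qs).2.2.1 = (PySem.List.dedup qs).map Prod.fst := by rw [h2]
          have hut : (pvRunB qs).2.2.2 = (PySem.List.dedup qs).map Prod.snd := by rw [h2]
          rw [hids, hus, hut, pvDict_append]
          have hget : (PySem.List.dedup qs)[(PySem.List.dedup qs).idxOf x] = x :=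
            List.getElem_idxOf hk
          have := pvMap_set (PySem.List.dedup qs) (PySem.List.nodup_dedup qs)
            ((PySem.List.dedup qs).idxOf x) hk
            (fun u => (pvDict qs).getD u 0)
            (fun u => ((pvDict qs).insert x (qs.length : Int)).getD u 0)
            (fun u _ hne => PySem.Dict.getD_insert_of_ne _ _ _ (by rw [hget] at hne; exact hne))
          rw [this, hget]
          simp [PySem.Dict.getD_insert_self]
      · -- fresh pair: append index and components, record slot = current length
        have hxd : x ∉ PySem.List.dedup qs := fun h => hx ((PySem.List.mem_dedup qs x).1 h)
        have hxd' : x ∉ PySem.Set.ofList qs := by simpa using hxd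
        have hded : PySem.List.dedup (qs ++ [x]) = PySem.List.dedup qs ++ [x] := by
          simp only [PySem.List.dedup_eq_ofList, PySem.Set.ofList_append_singleton]
          exact PySem.Set.add_of_not_mem hxd'
        have hlen : (pvRunB qs).2.1.length = (PySem.List.dedup qs).length := by
          rw [ih2]; simp
        have hstep : pvRunB (qs ++ [x]) =
            ((pvRunB qs).1.insert x ((PySem.List.dedup qs).length : Int),
             (pvRunB qs).2.1 ++ [(qs.length : Int)],
             (pvRunB qs).2.2.1 ++ [x.1], (pvRunB qs).2.2.2 ++ [x.2]) := by
          rw [hrun]; unfold pvStepB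
          rw [ih1 x, if_neg hx]
          simp [hlen]
        refine ⟨?_, ?_⟩
        · intro u
          rw [hstep]
          simp only []
          rw [PySem.Dict.get?_insert, hded]
          by_cases hux : u = x
          · subst hux
            rw [if_pos rfl, if_pos (by simp)]
            congr 2
            simp [List.idxOf_append, hxd']
          · rw [if_neg hux, ih1 u]
            by_cases hu : u ∈ qs
            · rw [if_pos hu, if_pos (by simp [hu])]
              congr 2
              have hud : u ∈ PySem.Set.ofList qs := by
                simpa using (PySem.List.mem_dedup qs u).2 hu
              simp [List.idxOf_append, hud]
            · rw [if_neg hu, if_neg (by simp [hu, hux])]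
        · rw [hstep]
          simp only []
          rw [hded, ih2, pvDict_append]
          refine Prod.ext ?_ (Prod.ext ?_ ?_) <;>
            simp only [List.map_append, List.map_cons, List.map_nil]
          · congr 1
            · apply List.map_congr_left
              intro u hu
              exact (PySem.Dict.getD_insert_of_ne _ _ _ (fun (h : u = x) => hxd (h ▸ hu))).symm
            · simp [PySem.Dict.getD_insert_self]

-- ===== VERDICT (by name: the statement is the Claim_ definition above) =====
theorem find_unique_spec : Claim_equal_find_unique := by
  intro src tgt _
  unfold Spec_find_unique find_unique find_unique_alt
  simp only []
  rw [pvDictA_eq, pvFoldl_triple, (pvRunB_spec (src.zip tgt)).2]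
  set ps := src.zip tgt with hps
  refine Prod.ext rfl (Prod.ext ?_ ?_)
  · -- unique_src component: src[idx] = pair.1
    simp only [List.nil_append]
    apply List.map_congr_left
    intro u hu
    have hu2 : u ∈ ps := (PySem.List.mem_dedup ps u).1 hu
    obtain ⟨h0, hlt, hget⟩ := pvDict_spec ps u hu2
    have hlen : ps.length ≤ src.length := by simp [hps]
    rw [PySem.List.pyGetD_eq_getElem src "" h0 (by omega)]
    have hu3 : ps[((pvDict ps).getD u 0).toNat]'(hlt) = u := by
      have := hget; rwa [List.getElem?_eq_getElem hlt, Option.some_inj] at this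
    conv_rhs => rw [← hu3]
    simp [hps]
  · -- unique_tgt component: tgt[idx] = pair.2
    simp only [List.nil_append]
    apply List.map_congr_left
    intro u hu
    have hu2 : u ∈ ps := (PySem.List.mem_dedup ps u).1 hu
    obtain ⟨h0, hlt, hget⟩ := pvDict_spec ps u hu2
    have hlen : ps.length ≤ tgt.length := by simp [hps]
    rw [PySem.List.pyGetD_eq_getElem tgt "" h0 (by omega)]
    have hu3 : ps[((pvDict ps).getD u 0).toNat]'(hlt) = u := by
      have := hget; rwa [List.getElem?_eq_getElem hlt, Option.some_inj] at this
    conv_rhs => rw [← hu3]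
    simp [hps]
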